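-- pv_equiv track=rewrite | github.com/Danni4real/Poker-Python | src/poker.py | delCards
-- ===== SOURCE A (Python) =====
-- def delCards(cards, subCards):
--     cardsCopy = cards[:]
--
--     for c in subCards:
--         if c in cardsCopy:
--             cardsCopy.remove(c)
--         else:
--             return False
--
--     for c in subCards:
--         cards.remove(c)
--     return True
-- ===== SOURCE B (Python) =====
-- def delCards(cards, subCards):
--     # Sort-then-merge: sort both lists and check multiset containment with a
--     # two-pointer sweep over the sorted sequences; then remove in place.
--     xs = sorted(cards)
--     ys = sorted(subCards)
--     i = j = 0
--     while j < len(ys):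
--         if i == len(xs):
--             return False
--         if xs[i] < ys[j]:
--             i += 1
--         elif xs[i] == ys[j]:
--             i += 1
--             j += 1
--         else:
--             return False
--     for c in subCards:
--         cards.remove(c)
--     return True
-- ===== Notes on version B (the rewrite author's own statement) =====
-- stated objective: alternative
-- what changed: Validation is done by sorting both lists and running a two-pointer merge sweep over the sorted sequences (sort-then-scan multiset containment) instead of A's scan-and-remove on a mutable copy; the in-place removal loop is kept.
import Mathlib
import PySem

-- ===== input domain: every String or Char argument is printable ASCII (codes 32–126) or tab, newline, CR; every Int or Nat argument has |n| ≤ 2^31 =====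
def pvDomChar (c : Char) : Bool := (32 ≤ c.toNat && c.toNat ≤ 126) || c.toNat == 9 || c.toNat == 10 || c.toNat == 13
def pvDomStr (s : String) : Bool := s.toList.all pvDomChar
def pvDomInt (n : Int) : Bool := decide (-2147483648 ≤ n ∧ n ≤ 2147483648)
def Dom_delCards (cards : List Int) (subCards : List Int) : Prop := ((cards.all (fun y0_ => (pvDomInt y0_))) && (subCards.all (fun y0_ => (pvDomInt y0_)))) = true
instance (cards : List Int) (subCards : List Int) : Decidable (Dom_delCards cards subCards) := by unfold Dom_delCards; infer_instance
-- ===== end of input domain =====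

-- B validates multiset containment by sorting both lists and running a
-- two-pointer merge sweep, instead of A's scan-and-remove on a mutable copy.
-- NOTE on side effects: both A and B remove each subCard from `cards` in place
-- exactly when they return True; the theorems below are about the RETURN value.

-- ===== PORT A =====
-- first loop of A: walk subCards, removing each found card from the copy
-- ('if c in cardsCopy: cardsCopy.remove(c) else: return False'; remove of a
-- present element is List.erase, per PySem.List.remove?_eq_some_erase).
def delCardsLoopA (copy : List Int) (subs : List Int) : Bool :=
  match subs with
  | [] => true
  | c :: rest => if copy.contains c then delCardsLoopA (copy.erase c) rest else false

def delCards (cards : List Int) (subCards : List Int) : Bool :=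
  -- cardsCopy = cards[:]; first loop; the second loop only mutates `cards`
  -- (every removal succeeds) and the function returns True.
  delCardsLoopA cards subCards

-- ===== PORT B =====
-- B's while loop: the two indices i, j walk suffixes of the sorted lists;
-- ported as the structural recursion on exactly those suffixes.
def mergeSub (xs ys : List Int) : Bool :=
  match xs, ys with
  | _, [] => true                                    -- j == len(ys): loop ends, removal succeeds, True
  | [], _ :: _ => false                              -- i == len(xs): return False
  | x :: xs', y :: ys' =>
      if x < y then mergeSub xs' (y :: ys')          -- xs[i] < ys[j]: i += 1
      else if x == y then mergeSub xs' ys'           -- xs[i] == ys[j]: i += 1; j += 1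
      else false                                     -- xs[i] > ys[j]: return False

def delCards_alt (cards : List Int) (subCards : List Int) : Bool :=
  -- xs = sorted(cards); ys = sorted(subCards); the final removal loop only
  -- mutates `cards`; the return value is the sweep's verdict.
  mergeSub (PySem.List.sorted cards (fun x => x) false)
           (PySem.List.sorted subCards (fun x => x) false)

-- ===== PRECONDITION & SPEC =====
def Spec_delCards (cards : List Int) (subCards : List Int) (out : Bool) : Prop := out = delCards_alt cards subCards
instance (cards : List Int) (subCards : List Int) (out : Bool) : Decidable (Spec_delCards cards subCards out) := by unfold Spec_delCards; infer_instance

-- ===== CLAIM =====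
def Claim_equal_delCards : Prop := ∀ (cards : List Int) (subCards : List Int), Dom_delCards cards subCards → Spec_delCards cards subCards (delCards cards subCards)

-- ===== LEMMAS AND PROOFS =====

theorem countc (a b : Int) (l : List Int) :
    List.count a (b :: l) = List.count a l + if b = a then 1 else 0 := by
  simp [List.count_cons]

-- A's loop decides multiset containment, stated via counts.
theorem loopA_iff (subs : List Int) :
    ∀ (copy : List Int),
      delCardsLoopA copy subs = true ↔ ∀ v, subs.count v ≤ copy.count v := by
  induction subs with
  | nil => intro copy; simp [delCardsLoopA]
  | cons c rest ih =>
      intro copy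
      simp only [delCardsLoopA]
      by_cases hmem : c ∈ copy
      · rw [if_pos (by simpa using hmem), ih]
        have hpos : 0 < copy.count c := List.count_pos_iff.mpr hmem
        have herase : ∀ v, (copy.erase c).count v =
            copy.count v - (if v = c then 1 else 0) := by
          intro v
          by_cases hvc : v = c
          · subst hvc; simp [List.count_erase_self]
          · simp [List.count_erase_of_ne (by simpa using hvc), hvc]
        constructor
        · intro h v
          have hv := h v
          rw [herase] at hv
          rw [countc]
          by_cases hvc : v = c
          · subst hvc; simp at hv ⊢; omega
          · have hcv : ¬ c = v := fun hh => hvc hh.symm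
            simp [hvc, hcv] at hv ⊢; omega
        · intro h v
          have hv := h v
          rw [countc] at hv
          rw [herase]
          by_cases hvc : v = c
          · subst hvc; simp at hv ⊢; omega
          · have hcv : ¬ c = v := fun hh => hvc hh.symm
            simp [hvc, hcv] at hv ⊢; omega
      · rw [if_neg (by simpa using hmem)]
        simp only [Bool.false_eq_true, false_iff]
        intro h
        have hz : copy.count c = 0 := List.count_eq_zero.mpr hmem
        have := h c
        rw [countc] at this
        simp [hz] at this

-- B's merge sweep decides multiset containment on sorted lists.
theorem mergeSub_iff (xs : List Int) :
    ∀ (ys : List Int), xs.Pairwise (· ≤ ·) → ys.Pairwise (· ≤ ·) →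
      (mergeSub xs ys = true ↔ ∀ v, ys.count v ≤ xs.count v) := by
  induction xs with
  | nil =>
      intro ys _ _
      cases ys with
      | nil => simp [mergeSub]
      | cons y ys' =>
          simp only [mergeSub, Bool.false_eq_true, false_iff]
          intro h
          have := h y
          rw [countc] at this
          simp at this
  | cons x xs' ih =>
      intro ys hxs hys
      cases ys with
      | nil => simp [mergeSub]
      | cons y ys' =>
          have hxs' : xs'.Pairwise (· ≤ ·) := hxs.tail
          have hys' : ys'.Pairwise (· ≤ ·) := hys.tail
          simp only [mergeSub]
          by_cases hlt : x < y
          · rw [if_pos (by exact_mod_cast hlt), ih (y :: ys') hxs' hys]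
            -- all elements of y::ys' are ≥ y > x, so x never occurs there
            have hnot : x ∉ y :: ys' := by
              intro hmem
              rcases List.mem_cons.mp hmem with h | h
              · omega
              · have := (List.pairwise_cons.mp hys).1 x h; omega
            have hzero : (y :: ys').count x = 0 := List.count_eq_zero.mpr hnot
            constructor
            · intro h v
              have hv := h v
              rw [countc]
              by_cases hvx : v = x
              · subst hvx
                rw [countc] at hzero
                have hyv : ¬ y = v := by omega
                simp [hyv] at hzero ⊢
                omega
              · have hxv : ¬ x = v := fun hh => hvx hh.symm
                rw [countc, if_neg hxv]
                rw [countc] at hv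
                omega
            · intro h v
              have hv := h v
              rw [countc] at hv ⊢
              by_cases hvx : v = x
              · subst hvx
                rw [countc] at hzero
                have hyv : ¬ y = v := by omega
                simp [hyv] at hzero ⊢
                omega
              · have hxv : ¬ x = v := fun hh => hvx hh.symm
                rw [countc, if_neg hxv] at hv
                omega
          · by_cases heq : x = y
            · subst heq
              rw [if_neg (by exact_mod_cast hlt), if_pos (by simp), ih ys' hxs' hys']
              constructor
              · intro h v
                have hv := h v
                rw [countc, countc]
                by_cases hxv : x = v <;> simp [hxv] <;> omega
              · intro h v
                have hv := h v
                rw [countc, countc] at hv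
                by_cases hxv : x = v <;> simp [hxv] at hv <;> omega
            · have hgt : y < x := by omega
              rw [if_neg (by exact_mod_cast hlt), if_neg (by simpa using heq)]
              simp only [Bool.false_eq_true, false_iff]
              intro h
              -- y < x and xs' all ≥ x, so y never occurs in x::xs'
              have hnot : y ∉ x :: xs' := by
                intro hmem
                rcases List.mem_cons.mp hmem with h | h
                · omega
                · have := (List.pairwise_cons.mp hxs).1 y h; omega
              have hzero : (x :: xs').count y = 0 := List.count_eq_zero.mpr hnot
              have := h y
              rw [hzero, countc] at this
              simp at this

-- ===== VERDICT =====
theorem delCards_spec : Claim_equal_delCards := by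
  intro cards subCards _
  unfold Spec_delCards delCards delCards_alt
  have hxp : (PySem.List.sorted cards (fun x => x) false).Perm cards :=
    PySem.List.sorted_perm cards (fun x => x) false
  have hyp : (PySem.List.sorted subCards (fun x => x) false).Perm subCards :=
    PySem.List.sorted_perm subCards (fun x => x) false
  have hxs : (PySem.List.sorted cards (fun x => x) false).Pairwise (· ≤ ·) := by
    simpa using PySem.List.sorted_pairwise (xs := cards) (key := fun x => x)
  have hys : (PySem.List.sorted subCards (fun x => x) false).Pairwise (· ≤ ·) := by
    simpa using PySem.List.sorted_pairwise (xs := subCards) (key := fun x => x)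
  have h1 := loopA_iff subCards cards
  have h2 := mergeSub_iff (PySem.List.sorted cards (fun x => x) false)
      (PySem.List.sorted subCards (fun x => x) false) hxs hys
  have hcount : ∀ v : Int, ((PySem.List.sorted subCards (fun x => x) false).count v ≤
      (PySem.List.sorted cards (fun x => x) false).count v ↔
      subCards.count v ≤ cards.count v) := by
    intro v; rw [hxp.count_eq, hyp.count_eq]
  cases hA : delCardsLoopA cards subCards with
  | true =>
      have := h1.mp hA
      exact (h2.mpr (fun v => (hcount v).mpr (this v))).symm
  | false =>
      cases hB : mergeSub (PySem.List.sorted cards (fun x => x) false)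
          (PySem.List.sorted subCards (fun x => x) false) with
      | true =>
          have hmp := h2.mp hB
          have : delCardsLoopA cards subCards = true :=
            h1.mpr (fun v => (hcount v).mp (hmp v))
          rw [hA] at this; exact absurd this (by simp)
      | false => rfl
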